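-- pv_equiv track=rewrite | github.com/nemethbalaazs/SOE_Prog1_PY | 2026/orai_anyagok/4. hét/rossz/03_szures_sikeresek.py | sikeresek_rosszul
-- ===== SOURCE A (Python) =====
-- def sikeresek_rosszul(values):
--    #az erdeti listát módosítja!!! (nem várt mellékhatás)
--     i = 0
--     while i < len(values):
--         if values[i] < 50:
--             values.pop(i)
--         else:
--             i += 1
--     return values
-- ===== SOURCE B (Python) =====
-- def sikeresek_rosszul(values):
--     # In-place like A: rebuild the kept elements in one comprehension pass and
--     # assign them back through a slice, preserving the list object's identity.
--     values[:] = [x for x in values if x >= 50]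
--     return values
-- ===== Notes on version B (the rewrite author's own statement) =====
-- stated objective: faster
-- what changed: Replaces the pop-at-index while-loop (each pop shifts the whole tail) with a single filtering comprehension assigned back via values[:], one linear pass instead of quadratic popping.
import Mathlib
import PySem

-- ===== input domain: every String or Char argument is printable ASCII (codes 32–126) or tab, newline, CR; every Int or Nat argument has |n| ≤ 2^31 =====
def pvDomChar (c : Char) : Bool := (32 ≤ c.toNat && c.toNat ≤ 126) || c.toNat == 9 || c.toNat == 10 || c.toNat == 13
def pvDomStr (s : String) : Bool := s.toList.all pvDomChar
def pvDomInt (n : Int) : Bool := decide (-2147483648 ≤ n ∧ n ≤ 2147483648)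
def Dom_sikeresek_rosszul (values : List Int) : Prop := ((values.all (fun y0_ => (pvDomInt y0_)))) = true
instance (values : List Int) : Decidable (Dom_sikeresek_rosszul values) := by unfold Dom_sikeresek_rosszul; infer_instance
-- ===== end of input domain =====

-- B replaces A's quadratic pop-at-index loop by a single filtering comprehension
-- assigned back in place; both Pythons mutate the argument to the same final
-- contents, and the equivalence proved here is about the return value.

-- ===== PORT A =====
-- while i < len(values): pop(i) if values[i] < 50 else i += 1
def sikeresek_rosszul_loopA (vals : List Int) (i : Nat) : List Int :=
  if h : i < vals.length then
    if vals[i] < 50 then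
      sikeresek_rosszul_loopA (vals.eraseIdx i) i
    else
      sikeresek_rosszul_loopA vals (i + 1)
  else vals
termination_by vals.length - i
decreasing_by
  · simp only [List.length_eraseIdx, h, if_pos]; omega
  · omega

def sikeresek_rosszul (values : List Int) : List Int :=
  sikeresek_rosszul_loopA values 0

-- ===== PORT B =====
-- values[:] = [x for x in values if x >= 50]; return values
def sikeresek_rosszul_alt (values : List Int) : List Int :=
  values.filter (fun x => decide (50 ≤ x))

-- ===== PRECONDITION & SPEC =====
def Spec_sikeresek_rosszul (values : List Int) (out : List Int) : Prop := out = sikeresek_rosszul_alt values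
instance (values : List Int) (out : List Int) : Decidable (Spec_sikeresek_rosszul values out) := by unfold Spec_sikeresek_rosszul; infer_instance

-- ===== CLAIM (what is proved, stated in full; the proofs are below) =====
def Claim_equal_sikeresek_rosszul : Prop := ∀ (values : List Int), Dom_sikeresek_rosszul values → Spec_sikeresek_rosszul values (sikeresek_rosszul values)

-- ===== LEMMAS AND PROOFS =====

theorem loopA_eq (n : Nat) : ∀ (vals : List Int) (i : Nat), vals.length - i ≤ n →
    (∀ x ∈ vals.take i, ¬ x < 50) →
    sikeresek_rosszul_loopA vals i
      = vals.take i ++ (vals.drop i).filter (fun x => decide (50 ≤ x)) := by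
  induction n with
  | zero =>
    intro vals i hn hpre
    have hle : vals.length ≤ i := by omega
    rw [sikeresek_rosszul_loopA]
    simp [Nat.not_lt.mpr hle, List.take_of_length_le hle, List.drop_of_length_le hle]
  | succ n ih =>
    intro vals i hn hpre
    rw [sikeresek_rosszul_loopA]
    by_cases h : i < vals.length
    · simp only [h, dif_pos]
      have hdrop : vals.drop i = vals[i] :: vals.drop (i + 1) :=
        List.drop_eq_getElem_cons h
      by_cases hlt : vals[i] < 50
      · simp only [hlt, if_pos]
        have htl : (vals.take i).length = i := by
          simp [Nat.le_of_lt h]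
        have herase : vals.eraseIdx i = vals.take i ++ vals.drop (i + 1) :=
          List.eraseIdx_eq_take_drop_succ vals i
        have htake : (vals.eraseIdx i).take i = vals.take i := by
          rw [herase, List.take_left' htl]
        have hdrop2 : (vals.eraseIdx i).drop i = vals.drop (i + 1) := by
          rw [herase, List.drop_left' htl]
        have hlen : (vals.eraseIdx i).length - i ≤ n := by
          simp only [List.length_eraseIdx, h, if_pos]; omega
        rw [ih _ _ hlen (by rw [htake]; exact hpre), htake, hdrop2, hdrop]
        have hd : (decide (50 ≤ vals[i])) = false := by simp; omega
        rw [List.filter_cons, hd]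
        simp
      · simp only [hlt, if_false]
        have htake1 : vals.take (i + 1) = vals.take i ++ [vals[i]] := by
          rw [List.take_add_one, List.getElem?_eq_getElem h]; rfl
        have hpre' : ∀ x ∈ vals.take (i + 1), ¬ x < 50 := by
          intro x hx
          rw [htake1, List.mem_append] at hx
          rcases hx with hx | hx
          · exact hpre x hx
          · simp at hx; omega
        rw [ih _ _ (by omega) hpre', htake1, hdrop]
        have hd : (decide (50 ≤ vals[i])) = true := by simp; omega
        rw [List.filter_cons, hd]
        rw [List.append_assoc]
        simp
    · simp only [h, dif_neg, not_false_iff]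
      have hle : vals.length ≤ i := by omega
      simp [List.take_of_length_le hle, List.drop_of_length_le hle]

-- ===== VERDICT (by name: the statement is the Claim_ definition above) =====
theorem sikeresek_rosszul_spec : Claim_equal_sikeresek_rosszul := by
  intro values _
  unfold Spec_sikeresek_rosszul sikeresek_rosszul sikeresek_rosszul_alt
  rw [loopA_eq values.length values 0 (by omega) (by simp)]
  simp
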